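-- pv_equiv track=rewrite | github.com/Astolsko/College-Labs | Sem-III/Operating Systems/Resource_Allocation_Or_Wait_Graph.py | wait_graph
-- ===== SOURCE A (Python) =====
-- def wait_graph(available, allocation, allocated, request):
--     process_count = len(request)
--     matrix = [[] for _ in range(process_count)]
--
--     for i in range(process_count):
--         if allocation[i] == 1:  # Process i's request is not fully satisfied
--             for j in range(process_count):
--                 if i != j:
--                     for k in range(len(request[0])):
--                         if request[i][k] > available[k] and allocated[j][k] > 0:
--                             matrix[i].append(j)  # i waits for j
--                             break
--     return matrix
-- ===== SOURCE B (Python) =====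
-- def wait_graph(available, allocation, allocated, request):
--     p = len(request)
--     if not any(allocation[i] == 1 for i in range(p)):
--         return [[] for _ in range(p)]
--     r = len(request[0])
--     hold = [sum(1 << k for k in range(r) if allocated[j][k] > 0) for j in range(p)]
--     out = []
--     for i in range(p):
--         if allocation[i] == 1:
--             need = sum(1 << k for k in range(r) if request[i][k] > available[k])
--             out.append([j for j in range(p) if j != i and need & hold[j]])
--         else:
--             out.append([])
--     return out
-- ===== Notes on version B (the rewrite author's own statement) =====
-- stated objective: alternative
-- what changed: Instead of re-scanning all R resources for every (i,j) pair, B precomputes a need bitmask per blocked process and a hold bitmask per process once, and tests each pair with a single bitwise AND (and returns all-empty rows immediately when no process is blocked).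
-- outside the precondition, e.g. on wait_graph([5], [1], [[]], [[1, 0]]): A returns [[]], B raises IndexError
import Mathlib
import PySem

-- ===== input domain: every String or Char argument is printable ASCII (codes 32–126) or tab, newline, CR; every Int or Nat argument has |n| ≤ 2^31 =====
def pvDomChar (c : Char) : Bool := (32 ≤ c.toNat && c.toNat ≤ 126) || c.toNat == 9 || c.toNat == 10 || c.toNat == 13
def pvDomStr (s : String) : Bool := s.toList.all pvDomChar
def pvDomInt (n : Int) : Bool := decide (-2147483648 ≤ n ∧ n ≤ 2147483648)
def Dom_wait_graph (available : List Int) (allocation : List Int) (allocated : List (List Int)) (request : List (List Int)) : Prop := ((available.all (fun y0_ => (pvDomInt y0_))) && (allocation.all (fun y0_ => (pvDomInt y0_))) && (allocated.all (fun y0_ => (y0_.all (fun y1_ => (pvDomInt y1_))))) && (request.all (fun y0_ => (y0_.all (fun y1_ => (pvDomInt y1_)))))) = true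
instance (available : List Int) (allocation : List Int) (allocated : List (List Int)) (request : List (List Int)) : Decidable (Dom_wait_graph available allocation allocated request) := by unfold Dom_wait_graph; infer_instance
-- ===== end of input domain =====

-- B replaces A's innermost per-pair scan over all resources by per-process need/hold bitmasks
-- built once, testing each pair with a single bitwise AND (objective: alternative algorithm).

-- ===== PORT A =====
-- Literal port of A. Python's `matrix[i]` is only appended to during iteration i of the outer
-- loop, so the outer loop is rendered as a map producing row i; the j-loop and the k-loop with
-- `break` keep their structure (the break-on-first-hit search is `List.any`). Loop counters are
-- Nat from `range`, cast to Int where Python uses them as values/indices.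
def wait_graph (available : List Int) (allocation : List Int) (allocated : List (List Int)) (request : List (List Int)) : List (List Int) :=
  let p := request.length
  (List.range p).map (fun (i : Nat) =>
    if PySem.List.pyGetD allocation (i : Int) 0 == 1 then
      (List.range p).foldl (fun (row : List Int) (j : Nat) =>
        if i ≠ j then
          if (List.range (PySem.List.pyGetD request (0 : Int) []).length).any (fun (k : Nat) =>
                decide (PySem.List.pyGetD available (k : Int) 0 < PySem.List.pyGetD (PySem.List.pyGetD request (i : Int) []) (k : Int) 0)
                && decide (0 < PySem.List.pyGetD (PySem.List.pyGetD allocated (j : Int) []) (k : Int) 0))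
          then row ++ [(j : Int)] else row
        else row) ([] : List Int)
    else [])

-- ===== PORT B =====
-- sum(1 << k for k in range(r) if c(k)) : fold the additions over the filtered range (1 << k = 2 ^ k, exact for k : Nat)
def pvMask (r : Nat) (c : Nat → Bool) : Nat :=
  ((List.range r).filter c).foldl (fun m k => m + 2 ^ k) 0

def wait_graph_alt (available : List Int) (allocation : List Int) (allocated : List (List Int)) (request : List (List Int)) : List (List Int) :=
  let p := request.length
  if ((List.range p).any (fun (i : Nat) => PySem.List.pyGetD allocation (i : Int) 0 == 1)) = false then
    (List.range p).map (fun _ => ([] : List Int))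
  else
    let r := (PySem.List.pyGetD request (0 : Int) []).length
    let hold := (List.range p).map (fun (j : Nat) =>
      pvMask r (fun k => decide (0 < PySem.List.pyGetD (PySem.List.pyGetD allocated (j : Int) []) (k : Int) 0)))
    (List.range p).foldl (fun (out : List (List Int)) (i : Nat) =>
      out ++ [if PySem.List.pyGetD allocation (i : Int) 0 == 1 then
          (((List.range p).filter (fun (j : Nat) =>
              decide (j ≠ i) &&
              decide ((pvMask r (fun k => decide (PySem.List.pyGetD available (k : Int) 0 < PySem.List.pyGetD (PySem.List.pyGetD request (i : Int) []) (k : Int) 0))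
                        &&& PySem.List.pyGetD hold (j : Int) 0) ≠ 0))).map (fun (j : Nat) => (j : Int)))
        else []]) []

-- ===== PRECONDITION & SPEC =====
-- Pre_ excludes exactly the IndexError inputs: A always reads allocation[0..p), and, once some
-- process is blocked (allocation[i] == 1), reads entries of request/available/allocated up to
-- r = len(request[0]); ragged inputs that A survives only because its short-circuit/loop
-- structure never touches the missing entries are excluded as an artefact of evaluation order.
def Pre_wait_graph (available : List Int) (allocation : List Int) (allocated : List (List Int)) (request : List (List Int)) : Prop :=
  request.length ≤ allocation.length ∧
  ((∃ i ∈ List.range request.length, allocation.getD i 0 = 1) →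
    (request.length ≤ allocated.length ∧
     (request.headD []).length ≤ available.length ∧
     (∀ row ∈ request, (request.headD []).length ≤ row.length) ∧
     (∀ row ∈ allocated.take request.length, (request.headD []).length ≤ row.length)))
instance (available : List Int) (allocation : List Int) (allocated : List (List Int)) (request : List (List Int)) : Decidable (Pre_wait_graph available allocation allocated request) := by unfold Pre_wait_graph; infer_instance

def pvWitness_wait_graph : List Int × List Int × List (List Int) × List (List Int) :=
  ([0], [1, 0], [[1], [0]], [[1], [0]])

def Spec_wait_graph (available : List Int) (allocation : List Int) (allocated : List (List Int)) (request : List (List Int)) (out : List (List Int)) : Prop := out = wait_graph_alt available allocation allocated request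
instance (available : List Int) (allocation : List Int) (allocated : List (List Int)) (request : List (List Int)) (out : List (List Int)) : Decidable (Spec_wait_graph available allocation allocated request out) := by unfold Spec_wait_graph; infer_instance

-- ===== CLAIM (what is proved, stated in full; the proofs are below) =====
def Claim_equal_wait_graph : Prop := ∀ (available : List Int) (allocation : List Int) (allocated : List (List Int)) (request : List (List Int)), Dom_wait_graph available allocation allocated request → Pre_wait_graph available allocation allocated request → Spec_wait_graph available allocation allocated request (wait_graph available allocation allocated request)

-- ===== LEMMAS AND PROOFS =====

theorem pvWitness_ok : Dom_wait_graph pvWitness_wait_graph.1 pvWitness_wait_graph.2.1 pvWitness_wait_graph.2.2.1 pvWitness_wait_graph.2.2.2 ∧ Pre_wait_graph pvWitness_wait_graph.1 pvWitness_wait_graph.2.1 pvWitness_wait_graph.2.2.1 pvWitness_wait_graph.2.2.2 := by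
  decide

theorem pvMask_succ (r : Nat) (c : Nat → Bool) :
    pvMask (r + 1) c = pvMask r c + (if c r then 2 ^ r else 0) := by
  unfold pvMask
  rw [List.range_succ, List.filter_append, List.foldl_append]
  by_cases h : c r <;> simp [h]

theorem pvMask_lt (r : Nat) (c : Nat → Bool) : pvMask r c < 2 ^ r := by
  induction r with
  | zero => simp [pvMask]
  | succ r ih =>
    rw [pvMask_succ]
    have h3 : (2 : Nat) ^ (r + 1) = 2 ^ r + 2 ^ r := by ring
    by_cases h : c r <;> simp [h] <;> omega

theorem testBit_pvMask (r : Nat) (c : Nat → Bool) (t : Nat) :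
    (pvMask r c).testBit t = (decide (t < r) && c t) := by
  induction r with
  | zero => simp [pvMask]
  | succ r ih =>
    rw [pvMask_succ]
    by_cases h : c r
    · simp only [h, if_pos]
      rw [Nat.add_comm]
      rcases Nat.lt_trichotomy t r with ht | ht | ht
      · rw [Nat.testBit_two_pow_add_gt ht, ih]
        have h1 : decide (t < r) = true := by simp [ht]
        have h2 : decide (t < r + 1) = true := by simp; omega
        rw [h1, h2]
      · subst ht
        rw [Nat.testBit_two_pow_add_eq, Nat.testBit_lt_two_pow (pvMask_lt t c)]
        simp [h]
      · have hle : (2 : Nat) ^ (r + 1) ≤ 2 ^ t := Nat.pow_le_pow_right (by norm_num) ht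
        have h3 : (2 : Nat) ^ (r + 1) = 2 ^ r + 2 ^ r := by ring
        have hlt : 2 ^ r + pvMask r c < 2 ^ t := by
          have h1 := pvMask_lt r c
          omega
        rw [Nat.testBit_lt_two_pow hlt]
        have h2 : decide (t < r + 1) = false := by simp; omega
        rw [h2, Bool.false_and]
    · simp only [h, if_neg, Bool.not_eq_true, Nat.add_zero, ih]
      rcases Nat.lt_trichotomy t r with ht | ht | ht
      · have h1 : decide (t < r) = true := by simp [ht]
        have h2 : decide (t < r + 1) = true := by simp; omega
        rw [h1, h2]
      · subst ht; simp [h]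
      · have h1 : decide (t < r) = false := by simp; omega
        have h2 : decide (t < r + 1) = false := by simp; omega
        rw [h1, h2]

theorem land_pvMask_ne_zero (r : Nat) (c d : Nat → Bool) :
    (pvMask r c &&& pvMask r d ≠ 0) ↔ ∃ k, k < r ∧ c k = true ∧ d k = true := by
  constructor
  · intro h
    obtain ⟨t, ht⟩ := Nat.exists_testBit_of_ne_zero h
    rw [Nat.testBit_and, testBit_pvMask, testBit_pvMask] at ht
    simp only [Bool.and_eq_true, decide_eq_true_eq] at ht
    exact ⟨t, ht.1.1, ht.1.2, ht.2.2⟩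
  · rintro ⟨k, hk, hc, hd⟩
    intro h0
    have htb : (pvMask r c &&& pvMask r d).testBit k = true := by
      rw [Nat.testBit_and, testBit_pvMask, testBit_pvMask, hc, hd]
      simp [hk]
    rw [h0] at htb
    simp at htb

-- the break-search of A's k-loop equals "the two masks share a bit"
theorem any_eq_land (r : Nat) (c d : Nat → Bool) :
    (List.range r).any (fun k => c k && d k) = decide (pvMask r c &&& pvMask r d ≠ 0) := by
  rw [Bool.eq_iff_iff]
  simp only [List.any_eq_true, List.mem_range, Bool.and_eq_true, decide_eq_true_eq,
    land_pvMask_ne_zero]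

-- ===== VERDICT (by name: the statement is the Claim_ definition above) =====
theorem wait_graph_spec : Claim_equal_wait_graph := by
  intro available allocation allocated request _ _
  unfold Spec_wait_graph wait_graph wait_graph_alt
  set p := request.length with hp
  set r := (PySem.List.pyGetD request (0 : Int) []).length with hr
  by_cases hguard : ((List.range p).any (fun (i : Nat) => PySem.List.pyGetD allocation (i : Int) 0 == 1)) = false
  · rw [if_pos hguard]
    apply List.map_congr_left
    intro i hi
    have hfalse := (List.any_eq_false.mp hguard) i hi
    simp only [hfalse, Bool.false_eq_true, if_false]
  · rw [if_neg hguard, PySem.List.foldl_append_singleton_eq_map, List.nil_append]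
    apply List.map_congr_left
    intro i hi
    rw [List.mem_range] at hi
    by_cases hbi : (PySem.List.pyGetD allocation (i : Int) 0 == 1) = true
    · rw [if_pos hbi, if_pos hbi]
      rw [PySem.List.foldl_congr_mem (List.range p) _
        (fun (row : List Int) (j : Nat) =>
          if (decide (j ≠ i) &&
              decide ((pvMask r (fun k => decide (PySem.List.pyGetD available (k : Int) 0 < PySem.List.pyGetD (PySem.List.pyGetD request (i : Int) []) (k : Int) 0))
                        &&& PySem.List.pyGetD ((List.range p).map (fun (j : Nat) =>
                              pvMask r (fun k => decide (0 < PySem.List.pyGetD (PySem.List.pyGetD allocated (j : Int) []) (k : Int) 0)))) (j : Int) 0) ≠ 0)) = true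
          then row ++ [(j : Int)] else row) ([] : List Int) ?_]
      · rw [PySem.List.foldl_append_if, List.nil_append]
      · intro acc j hj
        rw [List.mem_range] at hj
        beta_reduce
        have hhold : PySem.List.pyGetD ((List.range p).map (fun (j : Nat) =>
              pvMask r (fun k => decide (0 < PySem.List.pyGetD (PySem.List.pyGetD allocated (j : Int) []) (k : Int) 0)))) (j : Int) 0
            = pvMask r (fun k => decide (0 < PySem.List.pyGetD (PySem.List.pyGetD allocated (j : Int) []) (k : Int) 0)) := by
          rw [PySem.List.pyGetD_natCast, PySem.List.getD_map_range _ _ _ _ hj]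
        rw [hhold]
        by_cases hij : i = j
        · subst hij
          simp
        · rw [if_pos hij, any_eq_land]
          have h1 : decide (j ≠ i) = true := by simp [Ne.symm hij]
          rw [h1, Bool.true_and]
    · simp only [Bool.not_eq_true] at hbi
      simp only [hbi, Bool.false_eq_true, if_false]
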